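-- pv_equiv track=rewrite | github.com/BlasterWhite/ChevalierEchec | Algos/test.py | creer_plateau
-- ===== SOURCE A (Python) =====
-- def creer_plateau(taille,voisin,plateau):
--     ligne = [2,1,-1,-2,-2,-1,1,2]
--     colonne = [1,2,2,1,-1,-2,-2,-1]
--
--     plateau = [[0 for j in range(taille) ] for k in range(taille)]
--     n = 1
--
--     for i in range (1,taille+1):
--         for j in range (1,taille+1):
--             plateau[i-1][j-1] = n
--             n += 1
--
--     for i in range (0,taille):
--         for j in range (0,taille):
--             voisin[plateau[i][j]] = []
--             for k in range (0,8):
--                 if 0<=i+ligne[k]<taille and 0<=j+colonne[k]<taille: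
--                     voisin[plateau[i][j]].append(plateau[i+ligne[k]][j+colonne[k]])
--
--     return voisin,plateau
-- ===== SOURCE B (Python) =====
-- def creer_plateau(taille, voisin, plateau):
--     # Move-major sweep: number the board with ranges, then for each of the 8
--     # knight offsets append one shifted diagonal, bounds folded into the loop
--     # ranges (no per-cell membership test). Mutates voisin in place, like A.
--     plateau = [list(range(r * taille + 1, r * taille + taille + 1))
--                for r in range(taille)]
--     for i in range(taille):
--         for j in range(taille):
--             voisin[i * taille + j + 1] = []
--     for di, dj in ((2, 1), (1, 2), (-1, 2), (-2, 1),
--                    (-2, -1), (-1, -2), (1, -2), (2, -1)):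
--         for i in range(max(0, -di), taille - max(0, di)):
--             for j in range(max(0, -dj), taille - max(0, dj)):
--                 voisin[i * taille + j + 1].append((i + di) * taille + (j + dj) + 1)
--     return voisin, plateau
-- ===== Notes on version B (the rewrite author's own statement) =====
-- stated objective: alternative
-- what changed: Replaces A's cell-major neighbor construction (for each cell, scan all 8 moves with an in-bounds test) by a move-major sweep: after numbering the board with ranges and one init pass, each of the 8 knight offsets is applied as one whole-board pass over loop ranges pre-restricted to the in-bounds cells, so the per-cell bounds check disappears; per-cell append order is preserved because each pass appends at most one neighbor per cell and passes run in A's move order.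
import Mathlib
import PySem

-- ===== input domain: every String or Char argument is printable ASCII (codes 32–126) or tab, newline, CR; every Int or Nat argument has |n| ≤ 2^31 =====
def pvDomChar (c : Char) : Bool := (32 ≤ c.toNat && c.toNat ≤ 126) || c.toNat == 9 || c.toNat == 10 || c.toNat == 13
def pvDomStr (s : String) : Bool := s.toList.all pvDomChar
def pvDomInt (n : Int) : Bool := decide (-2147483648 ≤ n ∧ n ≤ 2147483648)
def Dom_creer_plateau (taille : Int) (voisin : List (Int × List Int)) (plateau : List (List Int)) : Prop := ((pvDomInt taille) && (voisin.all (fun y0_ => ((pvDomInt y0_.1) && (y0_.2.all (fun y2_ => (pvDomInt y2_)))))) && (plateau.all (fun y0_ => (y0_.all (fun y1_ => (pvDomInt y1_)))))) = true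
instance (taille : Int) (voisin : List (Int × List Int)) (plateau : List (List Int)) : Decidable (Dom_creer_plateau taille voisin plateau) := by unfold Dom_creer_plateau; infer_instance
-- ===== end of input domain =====

-- B replaces A's cell-major neighbor scan (8 bounds-checked moves per cell) by a move-major sweep:
-- one init pass, then one whole-board pass per knight offset with the bounds folded into the loop
-- ranges; objective: alternative (same cost, different traversal). Both mutate voisin in place;
-- the equivalence proved here is about the return value.


-- ===== PORT A =====
def creer_plateau (taille : Int) (voisin : List (Int × List Int)) (plateau : List (List Int)) : (List (Int × List Int)) × List (List Int) :=
  let ligne : List Int := [2, 1, -1, -2, -2, -1, 1, 2]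
  let colonne : List Int := [1, 2, 2, 1, -1, -2, -2, -1]
  -- plateau = [[0 for j in range(taille)] for k in range(taille)]
  let plateau0 : List (List Int) :=
    (PySem.List.pyRange 0 taille 1).map (fun _k => (PySem.List.pyRange 0 taille 1).map (fun _j => (0 : Int)))
  -- for i in range(1, taille+1): for j in range(1, taille+1): plateau[i-1][j-1] = n; n += 1
  -- (pyGetD/pySetD are the total forms of plateau[i-1] / item assignment; exact here, the indices are always in range)
  let st :=
    (PySem.List.pyRange 1 (taille + 1) 1).foldl (fun st i =>
      (PySem.List.pyRange 1 (taille + 1) 1).foldl (fun (st : List (List Int) × Int) j =>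
        (PySem.List.pySetD st.1 (i - 1)
           (PySem.List.pySetD (PySem.List.pyGetD st.1 (i - 1) []) (j - 1) st.2), st.2 + 1)) st)
      (plateau0, (1 : Int))
  let plateau1 := st.1
  -- for i in range(0, taille): for j in range(0, taille): voisin[plateau[i][j]] = []; for k in range(0,8): if …: append
  let d :=
    (PySem.List.pyRange 0 taille 1).foldl (fun d i =>
      (PySem.List.pyRange 0 taille 1).foldl (fun (d : PySem.Dict Int (List Int)) j =>
        let d := d.insert (PySem.List.pyGetD (PySem.List.pyGetD plateau1 i []) j 0) []
        (PySem.List.pyRange 0 8 1).foldl (fun d k =>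
          if (0 ≤ i + PySem.List.pyGetD ligne k 0 ∧ i + PySem.List.pyGetD ligne k 0 < taille) ∧
             (0 ≤ j + PySem.List.pyGetD colonne k 0 ∧ j + PySem.List.pyGetD colonne k 0 < taille) then
            d.modify (PySem.List.pyGetD (PySem.List.pyGetD plateau1 i []) j 0) []
              (fun l => l ++ [PySem.List.pyGetD (PySem.List.pyGetD plateau1 (i + PySem.List.pyGetD ligne k 0) [])
                                (j + PySem.List.pyGetD colonne k 0) 0])
          else d) d) d)
      (PySem.Dict.mk voisin)
  (d.items, plateau1)

-- ===== PORT B =====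
def creer_plateau_alt (taille : Int) (voisin : List (Int × List Int)) (plateau : List (List Int)) : (List (Int × List Int)) × List (List Int) :=
  -- plateau = [list(range(r*taille+1, r*taille+taille+1)) for r in range(taille)]
  let plateau1 : List (List Int) :=
    (PySem.List.pyRange 0 taille 1).map (fun r => PySem.List.pyRange (r * taille + 1) (r * taille + taille + 1) 1)
  -- for i in range(taille): for j in range(taille): voisin[i*taille+j+1] = []
  let d0 :=
    (PySem.List.pyRange 0 taille 1).foldl (fun d i =>
      (PySem.List.pyRange 0 taille 1).foldl (fun (d : PySem.Dict Int (List Int)) j =>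
        d.insert (i * taille + j + 1) []) d) (PySem.Dict.mk voisin)
  -- for di, dj in moves: for i in range(max(0,-di), taille-max(0,di)): for j in …: voisin[…].append(…)
  -- (voisin[k].append: the key is always present after the init pass, so Dict.modify is exact here)
  let d :=
    ([(2, 1), (1, 2), (-1, 2), (-2, 1), (-2, -1), (-1, -2), (1, -2), (2, -1)] : List (Int × Int)).foldl
      (fun d m =>
        (PySem.List.pyRange (max 0 (-m.1)) (taille - max 0 m.1) 1).foldl (fun d i =>
          (PySem.List.pyRange (max 0 (-m.2)) (taille - max 0 m.2) 1).foldl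
            (fun (d : PySem.Dict Int (List Int)) j =>
              d.modify (i * taille + j + 1) [] (fun l => l ++ [(i + m.1) * taille + (j + m.2) + 1])) d) d) d0
  (d.items, plateau1)

-- ===== PRECONDITION & SPEC =====
-- Pre_ requires voisin's keys to be distinct: the association list models a Python dict, which can
-- never hold duplicate keys, so no actual Python input is excluded (A is total on dicts).
def Pre_creer_plateau (taille : Int) (voisin : List (Int × List Int)) (plateau : List (List Int)) : Prop :=
  (voisin.map Prod.fst).Nodup
instance (taille : Int) (voisin : List (Int × List Int)) (plateau : List (List Int)) : Decidable (Pre_creer_plateau taille voisin plateau) := by unfold Pre_creer_plateau; infer_instance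
def pvWitness_creer_plateau : Int × (List (Int × List Int)) × List (List Int) := (2, [(5, [1]), (1, [])], [[3]])

def Spec_creer_plateau (taille : Int) (voisin : List (Int × List Int)) (plateau : List (List Int)) (out : (List (Int × List Int)) × List (List Int)) : Prop := out = creer_plateau_alt taille voisin plateau
instance (taille : Int) (voisin : List (Int × List Int)) (plateau : List (List Int)) (out : (List (Int × List Int)) × List (List Int)) : Decidable (Spec_creer_plateau taille voisin plateau out) := by unfold Spec_creer_plateau; infer_instance

-- ===== CLAIM (what is proved, stated in full; the proofs are below) =====
def Claim_equal_creer_plateau : Prop := ∀ (taille : Int) (voisin : List (Int × List Int)) (plateau : List (List Int)), Dom_creer_plateau taille voisin plateau → Pre_creer_plateau taille voisin plateau → Spec_creer_plateau taille voisin plateau (creer_plateau taille voisin plateau)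

-- ===== LEMMAS AND PROOFS =====

-- ---- shared vocabulary of the proof ----
def pvMoves : List (Int × Int) := [(2, 1), (1, 2), (-1, 2), (-2, 1), (-2, -1), (-1, -2), (1, -2), (2, -1)]

def pvMat (taille : Int) : List (List Int) :=
  (PySem.List.pyRange 0 taille 1).map (fun i => (PySem.List.pyRange 0 taille 1).map (fun j => i * taille + j + 1))

def pvCells (t : Int) : List (Int × Int) :=
  (PySem.List.pyRange 0 t 1).flatMap (fun i => (PySem.List.pyRange 0 t 1).map (fun j => (i, j)))

def pvKeyF (t : Int) (c : Int × Int) : Int := c.1 * t + c.2 + 1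

def pvL (t : Int) (c : Int × Int) : List Int :=
  (pvMoves.filter (fun m =>
      decide ((0 ≤ c.1 + m.1 ∧ c.1 + m.1 < t) ∧ (0 ≤ c.2 + m.2 ∧ c.2 + m.2 < t)))).map
    (fun m => (c.1 + m.1) * t + (c.2 + m.2) + 1)

def pvOps (t : Int) : List ((Int × Int) × Int × Int) :=
  pvMoves.flatMap (fun m =>
    (PySem.List.pyRange (max 0 (-m.1)) (t - max 0 m.1) 1).flatMap (fun i =>
      (PySem.List.pyRange (max 0 (-m.2)) (t - max 0 m.2) 1).map (fun j => (m, i, j))))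

def pvOpKey (t : Int) (x : (Int × Int) × Int × Int) : Int := x.2.1 * t + x.2.2 + 1
def pvOpVal (t : Int) (x : (Int × Int) × Int × Int) : Int := (x.2.1 + x.1.1) * t + (x.2.2 + x.1.2) + 1
def pvApp (t k : Int) : List Int := (((pvOps t).filter (fun x => pvOpKey t x == k)).map (pvOpVal t))

theorem pv_key_inj (t i j i' j' : Int) (hj0 : 0 ≤ j) (hj1 : j < t) (hj0' : 0 ≤ j') (hj1' : j' < t)
    (h : i * t + j + 1 = i' * t + j' + 1) : i = i' ∧ j = j' := by
  have ht : 0 < t := by omega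
  rcases lt_trichotomy i i' with hlt | heq | hgt
  · exfalso
    have h1 : (1 : Int) ≤ i' - i := by omega
    have := mul_le_mul_of_nonneg_right h1 (le_of_lt ht)
    nlinarith
  · constructor
    · exact heq
    · subst heq; omega
  · exfalso
    have h1 : (1 : Int) ≤ i - i' := by omega
    have := mul_le_mul_of_nonneg_right h1 (le_of_lt ht)
    nlinarith

theorem pv_filter_range_map (n : Nat) (a v : Int) :
    ((List.range n).map (fun u : Nat => a + (u : Int))).filter (fun u => u == v)
    = if a ≤ v ∧ v < a + n then [v] else [] := by
  induction n with
  | zero =>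
    have : ¬(a ≤ v ∧ v < a + ((0 : Nat) : Int)) := by push_cast; omega
    simp [this]
  | succ n ih =>
    rw [List.range_succ, List.map_append, List.filter_append, ih]
    by_cases hv : v = a + n
    · have h1 : ¬(a ≤ v ∧ v < a + (n : Int)) := by omega
      have h2 : a ≤ v ∧ v < a + ((n : Nat) + 1 : Nat) := by push_cast; omega
      rw [if_neg h1, if_pos h2]
      simp [hv]
    · have heq : (a ≤ v ∧ v < a + ((n : Nat) + 1 : Nat)) ↔ (a ≤ v ∧ v < a + (n : Int)) := by
        push_cast; omega
      rw [if_congr heq rfl rfl]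
      have : ((a + (n : Int)) == v) = false := by simp; omega
      simp [this]

theorem pv_filter_pyRange_one (a b v : Int) :
    (PySem.List.pyRange a b 1).filter (fun u => u == v) = if a ≤ v ∧ v < b then [v] else [] := by
  rw [PySem.List.pyRange_one, pv_filter_range_map]
  by_cases h : a ≤ v ∧ v < b
  · rw [if_pos h, if_pos (by constructor; exact h.1; omega)]
  · rw [if_neg h, if_neg (by omega)]

theorem pv_pyRange_nodup (a b : Int) : (PySem.List.pyRange a b 1).Nodup := by
  rw [PySem.List.pyRange_one]
  exact List.Nodup.map (fun u v h => by omega) (List.nodup_range)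

theorem pv_flatMap_single {α β : Type} [DecidableEq α] (l : List α) (f : α → List β) (a : α)
    (hnd : l.Nodup) (h : ∀ x ∈ l, x ≠ a → f x = []) :
    l.flatMap f = if a ∈ l then f a else [] := by
  induction l with
  | nil => simp
  | cons x l ih =>
    simp only [List.nodup_cons] at hnd
    rw [List.flatMap_cons]
    by_cases hx : x = a
    · subst hx
      have : l.flatMap f = [] := by
        rw [List.flatMap_eq_nil_iff]
        intro y hy
        exact h y (by simp [hy]) (fun hya => hnd.1 (hya ▸ hy))
      simp [this]
    · rw [h x (by simp) hx, List.nil_append, ih hnd.2 (fun y hy => h y (by simp [hy]))]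
      have : (a ∈ x :: l) ↔ (a ∈ l) := by simp [Ne.symm hx]
      simp [this]

theorem pv_filtermap_flatMap {α β : Type} (l : List α) (p : α → Bool) (f : α → β) :
    (l.filter p).map f = l.flatMap (fun x => if p x then [f x] else []) := by
  induction l with
  | nil => simp
  | cons x l ih =>
    rw [List.filter_cons, List.flatMap_cons, ← ih]
    by_cases hp : p x
    · simp [hp]
    · simp [hp]

theorem pv_items_foldl_insert {ι : Type} (xs : List ι) (key : ι → Int) (val : ι → List Int)
    (d : PySem.Dict Int (List Int)) (hnd : (xs.map key).Nodup) :
    (xs.foldl (fun d x => d.insert (key x) (val x)) d).items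
    = d.items.map (fun q => match xs.find? (fun x => key x == q.1) with
        | some x => (q.1, val x) | none => q)
      ++ (xs.filter (fun x => !(d.contains (key x)))).map (fun x => (key x, val x)) := by
  induction xs generalizing d with
  | nil => simp
  | cons x xs ih =>
    simp only [List.map_cons, List.nodup_cons, List.mem_map] at hnd
    obtain ⟨hnotin, hnd'⟩ := hnd
    have hfind_none : xs.find? (fun y => key y == key x) = none := by
      rw [List.find?_eq_none]
      intro y hy
      simp only [beq_iff_eq]
      intro hEq
      exact hnotin ⟨y, hy, hEq⟩
    simp only [List.foldl_cons]
    rw [ih _ hnd']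
    have hcont : ∀ y, (d.insert (key x) (val x)).contains (key y) = (key y == key x || d.contains (key y)) :=
      fun y => PySem.Dict.contains_insert d (key x) (key y) (val x)
    have hfilter : xs.filter (fun y => !((d.insert (key x) (val x)).contains (key y)))
        = xs.filter (fun y => !(d.contains (key y))) := by
      apply List.filter_congr
      intro y hy
      rw [hcont y]
      have : (key y == key x) = false := by
        simp only [beq_eq_false_iff_ne, ne_eq]
        intro hEq
        exact hnotin ⟨y, hy, hEq⟩
      rw [this, Bool.false_or]
    rw [hfilter]
    by_cases hck : d.contains (key x) = true
    · rw [PySem.Dict.items_insert_of_contains d (val x) hck, List.map_map]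
      have hmapeq : ∀ q ∈ d.items,
          ((fun q => match xs.find? (fun y => key y == q.1) with
              | some y => (q.1, val y) | none => q) ∘
            (fun p => if p.1 == key x then (key x, val x) else p)) q
          = (fun q => match (x :: xs).find? (fun y => key y == q.1) with
              | some y => (q.1, val y) | none => q) q := by
        intro q _
        simp only [Function.comp_apply, List.find?_cons]
        by_cases hq : q.1 = key x
        · have hb : (q.1 == key x) = true := by simp [hq]
          have hb2 : (key x == q.1) = true := by simp [hq]
          simp [hb, hb2, hfind_none, hq]
        · have hb : (q.1 == key x) = false := by simp [hq]
          have hb2 : (key x == q.1) = false := by simp [Ne.symm hq]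
          simp [hb, hb2]
      rw [List.map_congr_left hmapeq]
      simp [List.filter_cons, hck]
    · have hck' : d.contains (key x) = false := by simpa using hck
      rw [PySem.Dict.items_insert_of_not_contains d (val x) hck']
      rw [List.map_append]
      have hnew : ([(key x, val x)] : List (Int × List Int)).map
          (fun q => match xs.find? (fun y => key y == q.1) with
            | some y => (q.1, val y) | none => q) = [(key x, val x)] := by
        simp [hfind_none]
      rw [hnew]
      have hmapeq : ∀ q ∈ d.items,
          (fun q => match xs.find? (fun y => key y == q.1) with
            | some y => (q.1, val y) | none => q) q
          = (fun q => match (x :: xs).find? (fun y => key y == q.1) with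
            | some y => (q.1, val y) | none => q) q := by
        intro q hq
        have hqne : q.1 ≠ key x := by
          intro hEq
          have : d.contains q.1 = true := by
            rw [PySem.Dict.contains_iff_mem_keys]
            exact PySem.Dict.mem_keys_of_mem_items _ hq
          rw [hEq] at this
          rw [this] at hck'
          exact absurd hck' (by simp)
        simp only [List.find?_cons]
        have hb2 : (key x == q.1) = false := by simp [Ne.symm hqne]
        simp only [hb2]
      rw [List.map_congr_left hmapeq]
      simp [List.filter_cons, hck']

theorem pv_items_foldl_modify {ι : Type} (xs : List ι) (key : ι → Int) (val : ι → Int)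
    (d : PySem.Dict Int (List Int)) (hnk : d.keys.Nodup)
    (hc : ∀ x ∈ xs, d.contains (key x) = true) :
    (xs.foldl (fun d x => d.modify (key x) [] (fun l => l ++ [val x])) d).items
    = d.items.map (fun q => (q.1, q.2 ++ ((xs.filter (fun x => key x == q.1)).map val))) := by
  induction xs generalizing d with
  | nil =>
    simp only [List.foldl_nil, List.filter_nil, List.map_nil, List.append_nil]
    symm
    apply List.map_id''
    intro q
    simp
  | cons x xs ih =>
    have hcx := hc x (by simp)
    simp only [List.foldl_cons]
    have hmod : d.modify (key x) [] (fun l => l ++ [val x])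
        = d.insert (key x) (d.getD (key x) [] ++ [val x]) := rfl
    rw [hmod]
    have hnk' : (d.insert (key x) (d.getD (key x) [] ++ [val x])).keys.Nodup :=
      PySem.Dict.nodup_keys_insert d (key x) _ hnk
    have hc' : ∀ y ∈ xs, (d.insert (key x) (d.getD (key x) [] ++ [val x])).contains (key y) = true := by
      intro y hy
      rw [PySem.Dict.contains_insert]
      rw [hc y (by simp [hy])]
      simp
    rw [ih _ hnk' hc']
    rw [PySem.Dict.items_insert_of_contains d _ hcx, List.map_map]
    apply List.map_congr_left
    intro q hq
    simp only [Function.comp_apply, List.filter_cons]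
    by_cases hqk : q.1 = key x
    · have hb : (q.1 == key x) = true := by simp [hqk]
      have hb2 : (key x == q.1) = true := by simp [hqk]
      have hgd : d.getD (key x) [] = q.2 := by
        rw [← hqk]
        exact PySem.Dict.getD_of_mem_items d (by exact hq) hnk []
      simp [hb, hb2, hgd, hqk]
    · have hb : (q.1 == key x) = false := by simp [hqk]
      have hb2 : (key x == q.1) = false := by simp [Ne.symm hqk]
      simp [hb, hb2]


theorem pvApp_eq_flatMap (t k : Int) :
    pvApp t k = pvMoves.flatMap (fun m =>
      (PySem.List.pyRange (max 0 (-m.1)) (t - max 0 m.1) 1).flatMap (fun i' =>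
        if max 0 (-m.2) ≤ k - i' * t - 1 ∧ k - i' * t - 1 < t - max 0 m.2 then
          [(i' + m.1) * t + ((k - i' * t - 1) + m.2) + 1]
        else [])) := by
  unfold pvApp pvOps
  rw [List.filter_flatMap, List.map_flatMap]
  apply List.flatMap_congr
  intro m _
  rw [List.filter_flatMap, List.map_flatMap]
  apply List.flatMap_congr
  intro i' _
  rw [List.filter_map]
  have hpred : ((fun x => pvOpKey t x == k) ∘ (fun j' => (m, i', j')))
      = (fun j' : Int => j' == k - i' * t - 1) := by
    funext j'
    simp only [Function.comp_apply, pvOpKey]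
    rw [Bool.eq_iff_iff]
    simp only [beq_iff_eq]
    constructor <;> intro h <;> linarith
  rw [hpred, pv_filter_pyRange_one]
  by_cases hc : max 0 (-m.2) ≤ k - i' * t - 1 ∧ k - i' * t - 1 < t - max 0 m.2
  · rw [if_pos hc, if_pos hc]
    simp [pvOpVal]
  · rw [if_neg hc, if_neg hc]
    simp

theorem pvApp_cell (t i j : Int) (hi0 : 0 ≤ i) (hi1 : i < t) (hj0 : 0 ≤ j) (hj1 : j < t) :
    pvApp t (i * t + j + 1) = pvL t (i, j) := by
  rw [pvApp_eq_flatMap]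
  unfold pvL
  rw [pv_filtermap_flatMap]
  apply List.flatMap_congr
  intro m _
  have harith : ∀ i' : Int, (i * t + j + 1) - i' * t - 1 = (i - i') * t + j := by
    intro i'; ring
  have hinner : (PySem.List.pyRange (max 0 (-m.1)) (t - max 0 m.1) 1).flatMap (fun i' =>
      if max 0 (-m.2) ≤ (i * t + j + 1) - i' * t - 1 ∧ (i * t + j + 1) - i' * t - 1 < t - max 0 m.2 then
        [(i' + m.1) * t + (((i * t + j + 1) - i' * t - 1) + m.2) + 1]
      else [])
      = if i ∈ PySem.List.pyRange (max 0 (-m.1)) (t - max 0 m.1) 1 then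
          (if max 0 (-m.2) ≤ j ∧ j < t - max 0 m.2 then [(i + m.1) * t + (j + m.2) + 1] else [])
        else [] := by
    rw [pv_flatMap_single _ _ i (pv_pyRange_nodup _ _)]
    · by_cases hmem : i ∈ PySem.List.pyRange (max 0 (-m.1)) (t - max 0 m.1) 1
      · rw [if_pos hmem, if_pos hmem]
        have h0 : (i * t + j + 1) - i * t - 1 = j := by ring
        rw [h0]
      · rw [if_neg hmem, if_neg hmem]
    · intro i' hi' hne
      rw [if_neg]
      intro hcond
      have hb := harith i'
      rw [hb] at hcond
      have hj'0 : 0 ≤ (i - i') * t + j := le_trans (le_max_left 0 _) hcond.1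
      have hj'1 : (i - i') * t + j < t := lt_of_lt_of_le hcond.2 (by omega)
      have := pv_key_inj t i' ((i - i') * t + j) i j hj'0 hj'1 hj0 hj1 (by ring)
      exact hne this.1
  rw [hinner]
  have hmem_iff : i ∈ PySem.List.pyRange (max 0 (-m.1)) (t - max 0 m.1) 1
      ↔ (0 ≤ i + m.1 ∧ i + m.1 < t) := by
    rw [PySem.List.mem_pyRange_one]
    omega
  by_cases hA : (0 ≤ i + m.1 ∧ i + m.1 < t) <;> by_cases hB : (0 ≤ j + m.2 ∧ j + m.2 < t)
  · rw [if_pos (hmem_iff.mpr hA), if_pos (by omega), if_pos (by exact decide_eq_true (by exact ⟨hA, hB⟩))]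
  · rw [if_pos (hmem_iff.mpr hA), if_neg (by omega), if_neg (by simp [hA, hB])]
  · rw [if_neg (fun h => hA (hmem_iff.mp h)), if_neg (by simp [hA])]
  · rw [if_neg (fun h => hA (hmem_iff.mp h)), if_neg (by simp [hA])]

theorem pvApp_none (t k : Int)
    (h : ∀ i j : Int, 0 ≤ i → i < t → 0 ≤ j → j < t → i * t + j + 1 ≠ k) :
    pvApp t k = [] := by
  rw [pvApp_eq_flatMap]
  rw [List.flatMap_eq_nil_iff]
  intro m _
  rw [List.flatMap_eq_nil_iff]
  intro i' hi'
  rw [if_neg]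
  intro hcond
  have hi'b := PySem.List.mem_pyRange_one.mp hi'
  have hj'0 : 0 ≤ k - i' * t - 1 := le_trans (le_max_left 0 _) hcond.1
  have hj'1 : k - i' * t - 1 < t := lt_of_lt_of_le hcond.2 (by omega)
  exact h i' (k - i' * t - 1) (by omega) (by omega) hj'0 hj'1 (by ring)

theorem pvCells_keys_nodup (t : Int) : ((pvCells t).map (pvKeyF t)).Nodup := by
  unfold pvCells
  rw [List.map_flatMap]
  rw [List.nodup_flatMap]
  constructor
  · intro i _
    rw [List.map_map]
    refine List.Nodup.map ?_ (pv_pyRange_nodup _ _)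
    intro u v huv
    simp only [Function.comp_apply, pvKeyF] at huv
    omega
  · apply List.Pairwise.imp_of_mem ?_ (pv_pyRange_nodup 0 t)
    intro a b _ _ hne x hx1 hx2
    simp only [List.map_map, List.mem_map, Function.comp_apply] at hx1 hx2
    obtain ⟨j1, hj1, he1⟩ := hx1
    obtain ⟨j2, hj2, he2⟩ := hx2
    have hb1 := PySem.List.mem_pyRange_one.mp hj1
    have hb2 := PySem.List.mem_pyRange_one.mp hj2
    simp only [pvKeyF] at he1 he2
    exact hne (pv_key_inj t a j1 b j2 hb1.1 hb1.2 hb2.1 hb2.2 (he1.trans he2.symm)).1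

-- ---- A-side machinery (numbering pass and per-cell reduction) ----
theorem pvModify_insert_self (d : PySem.Dict Int (List Int)) (k : Int) (v d0 : List Int)
    (f : List Int → List Int) : (d.insert k v).modify k d0 f = d.insert k (f v) := by
  rw [PySem.Dict.modify, PySem.Dict.getD_insert_self, PySem.Dict.insert_insert_self]

theorem pvChain (cond : Int × Int → Prop) [DecidablePred cond] (val : Int × Int → Int)
    (ms : List (Int × Int)) (d : PySem.Dict Int (List Int)) (key : Int) (acc : List Int) :
    ms.foldl (fun d m => if cond m then d.modify key [] (fun l => l ++ [val m]) else d) (d.insert key acc)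
    = d.insert key (acc ++ (ms.filter (fun m => decide (cond m))).map val) := by
  induction ms generalizing acc with
  | nil => simp
  | cons m ms ih =>
    simp only [List.foldl_cons, List.filter_cons]
    by_cases h : cond m
    · rw [if_pos h, pvModify_insert_self, ih]; simp [h]
    · rw [if_neg h, ih]; simp [h]

theorem pvInnerFill (t : Nat) (mat : List (List Int)) (r : Nat) (hr : r < mat.length)
    (hrow : mat[r].length = t) (n0 : Int) (m : Nat) (hm : m ≤ t) :
    ((List.range m).map (fun k : Nat => (1 : Int) + (k : Int))).foldl
      (fun (st : List (List Int) × Int) j =>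
        (PySem.List.pySetD st.1 (r : Int)
           (PySem.List.pySetD (PySem.List.pyGetD st.1 (r : Int) []) (j - 1) st.2), st.2 + 1))
      (mat, n0)
    = (mat.set r (((List.range m).map (fun k : Nat => n0 + (k : Int))) ++ mat[r].drop m), n0 + m) := by
  induction m with
  | zero => simp
  | succ m ih =>
    have hm' : m ≤ t := Nat.le_of_succ_le hm
    rw [List.range_succ, List.map_append, List.foldl_append, ih hm']
    simp only [List.map_cons, List.map_nil, List.foldl_cons, List.foldl_nil]
    have hget : PySem.List.pyGetD
        (mat.set r (((List.range m).map (fun k : Nat => n0 + (k : Int))) ++ mat[r].drop m)) (r : Int) []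
        = ((List.range m).map (fun k : Nat => n0 + (k : Int))) ++ mat[r].drop m := by
      rw [PySem.List.pyGetD_natCast]
      simp [List.getD_eq_getElem?_getD, hr]
    rw [hget]
    have harith : (1 : Int) + (m : Int) - 1 = ((m : Nat) : Int) := by ring
    rw [harith, PySem.List.pySetD_natCast, PySem.List.pySetD_natCast]
    have hmlt : m < mat[r].length := by omega
    have hdrop : mat[r].drop m = mat[r][m] :: mat[r].drop (m + 1) := List.drop_eq_getElem_cons hmlt
    have hset : ((List.range m).map (fun k : Nat => n0 + (k : Int)) ++ mat[r].drop m).set m (n0 + m)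
        = ((List.range (m + 1)).map (fun k : Nat => n0 + (k : Int))) ++ mat[r].drop (m + 1) := by
      rw [hdrop, List.range_succ, List.map_append]
      simp
      rw [hdrop, List.set_cons_zero]
    rw [hset, List.set_set]
    simp only [Prod.mk.injEq]
    exact ⟨by rw [List.range_succ], by push_cast; ring⟩

theorem pvOuterFill (t : Nat) (mat : List (List Int)) (hlen : mat.length = t)
    (hrow : ∀ (r : Nat) (h : r < mat.length), mat[r].length = t) (n0 : Int) (m : Nat) (hm : m ≤ t) :
    ((List.range m).map (fun k : Nat => (1 : Int) + (k : Int))).foldl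
      (fun st i =>
        ((List.range t).map (fun k : Nat => (1 : Int) + (k : Int))).foldl
          (fun (st : List (List Int) × Int) j =>
            (PySem.List.pySetD st.1 (i - 1)
               (PySem.List.pySetD (PySem.List.pyGetD st.1 (i - 1) []) (j - 1) st.2), st.2 + 1)) st)
      (mat, n0)
    = ((List.range m).map (fun r : Nat =>
          (List.range t).map (fun k : Nat => n0 + (r : Int) * (t : Int) + (k : Int))) ++ mat.drop m,
       n0 + (m : Int) * (t : Int)) := by
  induction m with
  | zero => simp
  | succ m ih =>
    have hm' : m ≤ t := Nat.le_of_succ_le hm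
    rw [List.range_succ, List.map_append, List.foldl_append, ih hm']
    simp only [List.map_cons, List.map_nil, List.foldl_cons, List.foldl_nil]
    simp only [show (1 : Int) + (m : Int) - 1 = ((m : Nat) : Int) from by ring]
    set pref := (List.range m).map (fun r : Nat =>
        (List.range t).map (fun k : Nat => n0 + (r : Int) * (t : Int) + (k : Int))) with hpref
    have hplen : pref.length = m := by simp [hpref]
    have hr : m < (pref ++ mat.drop m).length := by
      simp [hplen, hlen]; omega
    have hrowlen : (pref ++ mat.drop m)[m].length = t := by
      have : (pref ++ mat.drop m)[m] = mat[m]'(by omega) := by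
        rw [List.getElem_append_right (by omega)]
        simp [hplen, List.getElem_drop]
      rw [this]
      exact hrow m (by omega)
    rw [pvInnerFill t (pref ++ mat.drop m) m hr hrowlen (n0 + (m : Int) * (t : Int)) t le_rfl]
    have hdropt : (pref ++ mat.drop m)[m].drop t = [] := by
      simp [hrowlen]
    rw [hdropt, List.append_nil]
    have hset : (pref ++ mat.drop m).set m
        ((List.range t).map (fun k : Nat => n0 + (m : Int) * (t : Int) + (k : Int)))
        = (List.range (m + 1)).map (fun r : Nat =>
            (List.range t).map (fun k : Nat => n0 + (r : Int) * (t : Int) + (k : Int))) ++ mat.drop (m + 1) := by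
      have hd : mat.drop m = mat[m]'(by omega) :: mat.drop (m + 1) := List.drop_eq_getElem_cons (by omega)
      rw [hd, List.range_succ, List.map_append]
      simp [hplen]
      rw [hd, List.set_cons_zero]
    rw [hset]
    simp only [Prod.mk.injEq]
    exact ⟨by rw [List.range_succ], by push_cast; ring⟩

theorem pvFirstPass (taille : Int) :
    ((PySem.List.pyRange 1 (taille + 1) 1).foldl (fun st i =>
        (PySem.List.pyRange 1 (taille + 1) 1).foldl (fun (st : List (List Int) × Int) j =>
          (PySem.List.pySetD st.1 (i - 1)
             (PySem.List.pySetD (PySem.List.pyGetD st.1 (i - 1) []) (j - 1) st.2), st.2 + 1)) st)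
      ((PySem.List.pyRange 0 taille 1).map
         (fun _k => (PySem.List.pyRange 0 taille 1).map (fun _j => (0 : Int))), (1 : Int))).1
    = pvMat taille := by
  have hr1 : PySem.List.pyRange 1 (taille + 1) 1
      = (List.range taille.toNat).map (fun k : Nat => (1 : Int) + (k : Int)) := by
    rw [PySem.List.pyRange_one]
    congr 2
    omega
  have hr0 : PySem.List.pyRange 0 taille 1
      = (List.range taille.toNat).map (fun k : Nat => ((k : Int))) := by
    rw [PySem.List.pyRange_one]
    simp
  rw [hr1, hr0, List.map_map]
  rw [pvOuterFill taille.toNat _ (by simp) (by intro r h; simp) 1 taille.toNat le_rfl]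
  rw [List.drop_eq_nil_of_le (by simp), List.append_nil]
  unfold pvMat
  rw [hr0, List.map_map]
  apply List.map_congr_left
  intro r hr
  simp only [Function.comp_apply, List.map_map]
  apply List.map_congr_left
  intro k hk
  simp only [Function.comp_apply]
  have ht : ((taille.toNat : Nat) : Int) = taille := by
    have := List.mem_range.mp hr
    omega
  rw [ht]
  ring

theorem pvKey (taille i j : Int) (hi0 : 0 ≤ i) (hi1 : i < taille) (hj0 : 0 ≤ j) (hj1 : j < taille) :
    PySem.List.pyGetD (PySem.List.pyGetD (pvMat taille) i []) j 0 = i * taille + j + 1 := by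
  unfold pvMat
  rw [PySem.List.pyGetD_map_pyRange_of_nonneg _ _ _ _ hi0 hi1,
      PySem.List.pyGetD_map_pyRange_of_nonneg _ _ _ _ hj0 hj1]

theorem pvCellEq (taille i j : Int) (hi0 : 0 ≤ i) (hi1 : i < taille) (hj0 : 0 ≤ j) (hj1 : j < taille)
    (d : PySem.Dict Int (List Int)) :
    (PySem.List.pyRange 0 8 1).foldl (fun d k =>
        if (0 ≤ i + PySem.List.pyGetD [2, 1, -1, -2, -2, -1, 1, 2] k 0 ∧
              i + PySem.List.pyGetD [2, 1, -1, -2, -2, -1, 1, 2] k 0 < taille) ∧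
           (0 ≤ j + PySem.List.pyGetD [1, 2, 2, 1, -1, -2, -2, -1] k 0 ∧
              j + PySem.List.pyGetD [1, 2, 2, 1, -1, -2, -2, -1] k 0 < taille) then
          d.modify (PySem.List.pyGetD (PySem.List.pyGetD (pvMat taille) i []) j 0) []
            (fun l => l ++ [PySem.List.pyGetD
                (PySem.List.pyGetD (pvMat taille) (i + PySem.List.pyGetD [2, 1, -1, -2, -2, -1, 1, 2] k 0) [])
                (j + PySem.List.pyGetD [1, 2, 2, 1, -1, -2, -2, -1] k 0) 0])
        else d)
      (d.insert (PySem.List.pyGetD (PySem.List.pyGetD (pvMat taille) i []) j 0) [])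
    = d.insert (i * taille + j + 1) (pvL taille (i, j)) := by
  have hkey := pvKey taille i j hi0 hi1 hj0 hj1
  rw [hkey]
  have hmap : pvMoves
      = (PySem.List.pyRange 0 8 1).map (fun k =>
          (PySem.List.pyGetD [2, 1, -1, -2, -2, -1, 1, 2] k 0,
           PySem.List.pyGetD [1, 2, 2, 1, -1, -2, -2, -1] k 0)) := by decide
  have hfold : (PySem.List.pyRange 0 8 1).foldl (fun d k =>
        if (0 ≤ i + PySem.List.pyGetD [2, 1, -1, -2, -2, -1, 1, 2] k 0 ∧
              i + PySem.List.pyGetD [2, 1, -1, -2, -2, -1, 1, 2] k 0 < taille) ∧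
           (0 ≤ j + PySem.List.pyGetD [1, 2, 2, 1, -1, -2, -2, -1] k 0 ∧
              j + PySem.List.pyGetD [1, 2, 2, 1, -1, -2, -2, -1] k 0 < taille) then
          d.modify (i * taille + j + 1) []
            (fun l => l ++ [PySem.List.pyGetD
                (PySem.List.pyGetD (pvMat taille) (i + PySem.List.pyGetD [2, 1, -1, -2, -2, -1, 1, 2] k 0) [])
                (j + PySem.List.pyGetD [1, 2, 2, 1, -1, -2, -2, -1] k 0) 0])
        else d)
      (d.insert (i * taille + j + 1) [])
      = pvMoves.foldl
          (fun d m =>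
            if (0 ≤ i + m.1 ∧ i + m.1 < taille) ∧ (0 ≤ j + m.2 ∧ j + m.2 < taille) then
              d.modify (i * taille + j + 1) []
                (fun l => l ++ [PySem.List.pyGetD (PySem.List.pyGetD (pvMat taille) (i + m.1) []) (j + m.2) 0])
            else d)
          (d.insert (i * taille + j + 1) []) := by
    rw [hmap, List.foldl_map]
  rw [hfold, pvChain (fun m => (0 ≤ i + m.1 ∧ i + m.1 < taille) ∧ (0 ≤ j + m.2 ∧ j + m.2 < taille))]
  unfold pvL
  congr 1
  rw [List.nil_append]
  apply List.map_congr_left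
  intro m hm
  have hc := List.of_mem_filter hm
  have hc' : (0 ≤ i + m.1 ∧ i + m.1 < taille) ∧ (0 ≤ j + m.2 ∧ j + m.2 < taille) := by
    simpa using hc
  exact pvKey taille (i + m.1) (j + m.2) hc'.1.1 hc'.1.2 hc'.2.1 hc'.2.2


theorem pv_mem_cells (t : Int) (c : Int × Int) :
    c ∈ pvCells t ↔ (0 ≤ c.1 ∧ c.1 < t) ∧ (0 ≤ c.2 ∧ c.2 < t) := by
  unfold pvCells
  simp only [List.mem_flatMap, List.mem_map, PySem.List.mem_pyRange_one]
  constructor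
  · rintro ⟨i, hi, j, hj, rfl⟩
    exact ⟨by simpa using hi, by simpa using hj⟩
  · rintro ⟨hi, hj⟩
    exact ⟨c.1, by simpa using hi, c.2, by simpa using hj, rfl⟩

theorem pv_ops_key_mem (t : Int) (x : (Int × Int) × Int × Int) (hx : x ∈ pvOps t) :
    pvOpKey t x ∈ (pvCells t).map (pvKeyF t) := by
  unfold pvOps at hx
  simp only [List.mem_flatMap, List.mem_map, PySem.List.mem_pyRange_one] at hx
  obtain ⟨m, _, i, hi, j, hj, rfl⟩ := hx
  refine List.mem_map.mpr ⟨(i, j), (pv_mem_cells t (i, j)).mpr ⟨⟨?_, ?_⟩, ?_, ?_⟩, rfl⟩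
  · omega
  · omega
  · omega
  · omega

-- ===== VERDICT (by name: the statement is the Claim_ definition above) =====
theorem creer_plateau_spec : Claim_equal_creer_plateau := by
  intro taille voisin plateau _ hpre
  unfold Spec_creer_plateau creer_plateau creer_plateau_alt
  dsimp only
  rw [pvFirstPass taille]
  -- reduce A's per-cell inner loop to a single insert of the final neighbor list
  have hd : ∀ d0 : PySem.Dict Int (List Int),
      (PySem.List.pyRange 0 taille 1).foldl (fun d i =>
        (PySem.List.pyRange 0 taille 1).foldl (fun (d : PySem.Dict Int (List Int)) j =>
          (PySem.List.pyRange 0 8 1).foldl (fun d k =>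
            if (0 ≤ i + PySem.List.pyGetD [2, 1, -1, -2, -2, -1, 1, 2] k 0 ∧
                  i + PySem.List.pyGetD [2, 1, -1, -2, -2, -1, 1, 2] k 0 < taille) ∧
               (0 ≤ j + PySem.List.pyGetD [1, 2, 2, 1, -1, -2, -2, -1] k 0 ∧
                  j + PySem.List.pyGetD [1, 2, 2, 1, -1, -2, -2, -1] k 0 < taille) then
              d.modify (PySem.List.pyGetD (PySem.List.pyGetD (pvMat taille) i []) j 0) []
                (fun l => l ++ [PySem.List.pyGetD
                    (PySem.List.pyGetD (pvMat taille)
                      (i + PySem.List.pyGetD [2, 1, -1, -2, -2, -1, 1, 2] k 0) [])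
                    (j + PySem.List.pyGetD [1, 2, 2, 1, -1, -2, -2, -1] k 0) 0])
            else d)
          (d.insert (PySem.List.pyGetD (PySem.List.pyGetD (pvMat taille) i []) j 0) [])) d) d0
      = (PySem.List.pyRange 0 taille 1).foldl (fun d i =>
        (PySem.List.pyRange 0 taille 1).foldl (fun (d : PySem.Dict Int (List Int)) j =>
          d.insert (i * taille + j + 1) (pvL taille (i, j))) d) d0 := by
    intro d0
    apply PySem.List.foldl_congr_mem
    intro dacc i hi
    apply PySem.List.foldl_congr_mem
    intro d j hj
    obtain ⟨hi0, hi1⟩ := (PySem.List.mem_pyRange_one).mp hi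
    obtain ⟨hj0, hj1⟩ := (PySem.List.mem_pyRange_one).mp hj
    exact pvCellEq taille i j (by simpa using hi0) hi1 (by simpa using hj0) hj1 d
  rw [hd]
  -- flatten all the nested folds over index ranges into folds over flat lists
  have hA : (PySem.List.pyRange 0 taille 1).foldl (fun d i =>
        (PySem.List.pyRange 0 taille 1).foldl (fun (d : PySem.Dict Int (List Int)) j =>
          d.insert (i * taille + j + 1) (pvL taille (i, j))) d) (PySem.Dict.mk voisin)
      = (pvCells taille).foldl (fun d c => d.insert (pvKeyF taille c) (pvL taille c))
          (PySem.Dict.mk voisin) := by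
    unfold pvCells
    rw [List.foldl_flatMap]
    simp only [List.foldl_map]
    rfl
  have hB0 : (PySem.List.pyRange 0 taille 1).foldl (fun d i =>
        (PySem.List.pyRange 0 taille 1).foldl (fun (d : PySem.Dict Int (List Int)) j =>
          d.insert (i * taille + j + 1) []) d) (PySem.Dict.mk voisin)
      = (pvCells taille).foldl (fun d c => d.insert (pvKeyF taille c) ([] : List Int))
          (PySem.Dict.mk voisin) := by
    unfold pvCells
    rw [List.foldl_flatMap]
    simp only [List.foldl_map]
    rfl
  rw [hA, hB0]
  have hBmv : ∀ dI : PySem.Dict Int (List Int),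
      ([(2, 1), (1, 2), (-1, 2), (-2, 1), (-2, -1), (-1, -2), (1, -2), (2, -1)] : List (Int × Int)).foldl
        (fun d m =>
          (PySem.List.pyRange (max 0 (-m.1)) (taille - max 0 m.1) 1).foldl (fun d i =>
            (PySem.List.pyRange (max 0 (-m.2)) (taille - max 0 m.2) 1).foldl
              (fun (d : PySem.Dict Int (List Int)) j =>
                d.modify (i * taille + j + 1) [] (fun l => l ++ [(i + m.1) * taille + (j + m.2) + 1])) d) d) dI
      = (pvOps taille).foldl
          (fun d x => d.modify (pvOpKey taille x) [] (fun l => l ++ [pvOpVal taille x])) dI := by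
    intro dI
    unfold pvOps pvMoves
    rw [List.foldl_flatMap]
    simp only [List.foldl_flatMap, List.foldl_map]
    rfl
  rw [hBmv]
  -- the initialized dictionary
  set dI := (pvCells taille).foldl (fun d c => d.insert (pvKeyF taille c) ([] : List Int))
      (PySem.Dict.mk voisin) with hdI
  have hD0nodup : (PySem.Dict.mk voisin).keys.Nodup := by
    rw [PySem.Dict.keys_mk]
    exact hpre
  have hInodup : dI.keys.Nodup := by
    rw [hdI]
    exact PySem.Dict.nodup_keys_foldl_insert_key (pvCells taille) (pvKeyF taille)
      (fun _ c => []) (PySem.Dict.mk voisin) hD0nodup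
  have hIcont : ∀ x ∈ pvOps taille, dI.contains (pvOpKey taille x) = true := by
    intro x hx
    rw [PySem.Dict.contains_iff_mem_keys, hdI]
    rw [PySem.Dict.keys_foldl_insert_key (pvCells taille) (pvKeyF taille) (fun _ c => []) _]
    rw [PySem.Set.mem_update]
    exact Or.inr (pv_ops_key_mem taille x hx)
  rw [pv_items_foldl_modify (pvOps taille) (pvOpKey taille) (pvOpVal taille) dI hInodup hIcont]
  rw [hdI]
  rw [pv_items_foldl_insert (pvCells taille) (pvKeyF taille) (pvL taille)
        (PySem.Dict.mk voisin) (pvCells_keys_nodup taille),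
      pv_items_foldl_insert (pvCells taille) (pvKeyF taille) (fun _ => ([] : List Int))
        (PySem.Dict.mk voisin) (pvCells_keys_nodup taille)]
  rw [List.map_append, List.map_map]
  simp only [Prod.mk.injEq]
  constructor
  case _ =>
    -- the items lists agree
    congr 1
    · -- entries already present in voisin
      apply List.map_congr_left
      intro q hq
      cases hfq : (pvCells taille).find? (fun c => pvKeyF taille c == q.1) with
      | some c =>
        have hkc : pvKeyF taille c = q.1 := by
          have := List.find?_some hfq
          simpa using this
        have hcm : c ∈ pvCells taille := List.mem_of_find?_eq_some hfq
        have hb := (pv_mem_cells taille c).mp hcm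
        simp only [Function.comp_apply, hfq]
        have happ : ((pvOps taille).filter (fun x => pvOpKey taille x == q.1)).map (pvOpVal taille)
            = pvL taille c := by
          show pvApp taille q.1 = pvL taille c
          rw [← hkc]
          have : pvKeyF taille c = c.1 * taille + c.2 + 1 := rfl
          rw [this]
          rw [pvApp_cell taille c.1 c.2 hb.1.1 hb.1.2 hb.2.1 hb.2.2]
        rw [happ]
        simp
      | none =>
        simp only [Function.comp_apply, hfq]
        have happ : ((pvOps taille).filter (fun x => pvOpKey taille x == q.1)).map (pvOpVal taille)
            = [] := by
          show pvApp taille q.1 = []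
          apply pvApp_none
          intro i j hi0 hi1 hj0 hj1 hEq
          have hcm : (i, j) ∈ pvCells taille := (pv_mem_cells taille (i, j)).mpr ⟨⟨hi0, hi1⟩, hj0, hj1⟩
          have := List.find?_eq_none.mp hfq (i, j) hcm
          simp only [pvKeyF, beq_iff_eq] at this
          exact this hEq
        rw [happ]
        simp
    · -- entries newly appended, in row-major order
      rw [List.map_map]
      apply List.map_congr_left
      intro c hc
      have hcm : c ∈ pvCells taille := List.mem_of_mem_filter hc
      have hb := (pv_mem_cells taille c).mp hcm
      simp only [Function.comp_apply]
      have happ : ((pvOps taille).filter (fun x => pvOpKey taille x == pvKeyF taille c)).map (pvOpVal taille)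
          = pvL taille c := by
        show pvApp taille (pvKeyF taille c) = pvL taille c
        have : pvKeyF taille c = c.1 * taille + c.2 + 1 := rfl
        rw [this]
        exact pvApp_cell taille c.1 c.2 hb.1.1 hb.1.2 hb.2.1 hb.2.2
      rw [happ]
      simp
  case _ =>
    -- the plateau lists agree
    unfold pvMat
    apply List.map_congr_left
    intro r hr
    rw [PySem.List.pyRange_one, PySem.List.pyRange_one]
    have hlen : (r * taille + taille + 1 - (r * taille + 1)).toNat = (taille - 0).toNat := by
      omega
    rw [hlen, List.map_map]
    apply List.map_congr_left
    intro k _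
    simp only [Function.comp_apply]
    ring
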